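-- pv_equiv track=rewrite | github.com/MrBrantCode/unitest_baseline | mut_generate/mist_train_taco/taco_18363/solution.py | count_possible_altars
-- ===== SOURCE A (Python) =====
-- def count_possible_altars(N, A, B, C):
--     """
--     Counts the number of different altars that can be built from the given parts.
--
--     Parameters:
--     N (int): The number of parts in each category.
--     A (list of int): List of sizes of the upper parts.
--     B (list of int): List of sizes of the middle parts.
--     C (list of int): List of sizes of the lower parts.
--
--     Returns:
--     int: The number of different altars that can be built.
--     """
--     # Sort the lists to facilitate binary search
--     A.sort()
--     B.sort()
--     C.sort()
--
--     import bisect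
--     sum = 0
--
--     # Iterate over each middle part
--     for b in B:
--         # Find the number of upper parts that are strictly smaller than the current middle part
--         b_num = bisect.bisect_left(A, b)
--         # Find the number of lower parts that are strictly larger than the current middle part
--         c_num = bisect.bisect_right(C, b)
--         # Calculate the number of valid combinations for the current middle part
--         sum += b_num * (len(C) - c_num)
--
--     return sum
-- ===== SOURCE B (Python) =====
-- def count_possible_altars(N, A, B, C):
--     # Same in-place sorts as the original (observable mutation preserved).
--     A.sort()
--     B.sort()
--     C.sort()
--     total = 0
--     i = 0
--     j = 0
--     nC = len(C)
--     # Single forward merge pass: since B is sorted, the pointers only move right.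
--     for b in B:
--         while i < len(A) and A[i] < b:
--             i += 1
--         while j < nC and C[j] <= b:
--             j += 1
--         total += i * (nC - j)
--     return total
-- ===== Notes on version B (the rewrite author's own statement) =====
-- stated objective: alternative
-- what changed: Replaces the two per-middle-part binary searches with a single linear two-pointer merge sweep over the sorted lists, advancing monotone pointers into A and C once each.
import Mathlib
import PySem

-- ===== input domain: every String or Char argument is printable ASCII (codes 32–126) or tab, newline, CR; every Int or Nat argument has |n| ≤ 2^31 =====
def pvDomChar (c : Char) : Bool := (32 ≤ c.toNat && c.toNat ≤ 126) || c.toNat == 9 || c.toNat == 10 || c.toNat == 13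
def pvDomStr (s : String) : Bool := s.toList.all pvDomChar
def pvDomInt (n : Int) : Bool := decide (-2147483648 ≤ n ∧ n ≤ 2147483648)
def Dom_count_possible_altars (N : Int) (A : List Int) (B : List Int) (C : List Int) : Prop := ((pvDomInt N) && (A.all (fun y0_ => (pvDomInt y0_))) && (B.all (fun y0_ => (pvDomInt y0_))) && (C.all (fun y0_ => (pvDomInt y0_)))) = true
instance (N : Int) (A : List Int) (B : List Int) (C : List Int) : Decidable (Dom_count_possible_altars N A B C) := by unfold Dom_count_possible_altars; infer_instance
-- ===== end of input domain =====

-- B replaces A's per-element binary searches with one linear two-pointer merge sweep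
-- (objective: alternative algorithm). Both Pythons sort A, B, C in place; the
-- equivalence proved here is about the return value (B performs the same mutation).

-- ===== PORT A =====
-- A sorts the three lists, then for each b in B adds bisect_left(A,b) * (len(C) - bisect_right(C,b)).
def count_possible_altars (N : Int) (A : List Int) (B : List Int) (C : List Int) : Int :=
  let As := PySem.List.sorted A (fun x => x)
  let Bs := PySem.List.sorted B (fun x => x)
  let Cs := PySem.List.sorted C (fun x => x)
  Bs.foldl (fun s b =>
    s + ((PySem.List.bisectLeft As b : Int)) * ((Cs.length : Int) - (PySem.List.bisectRight Cs b : Int))) 0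

-- ===== PORT B =====
-- `while i < len(xs) and p(xs[i]): i += 1` — advance the pointer while the predicate holds.
def pvAdvance (xs : List Int) (p : Int → Bool) (i : Nat) : Nat :=
  if h : i < xs.length then
    if p xs[i] then pvAdvance xs p (i + 1) else i
  else i
termination_by xs.length - i

def count_possible_altars_alt (N : Int) (A : List Int) (B : List Int) (C : List Int) : Int :=
  let As := PySem.List.sorted A (fun x => x)
  let Bs := PySem.List.sorted B (fun x => x)
  let Cs := PySem.List.sorted C (fun x => x)
  let nC := Cs.length
  let fin := Bs.foldl (fun (st : Nat × Nat × Int) b =>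
    let i := pvAdvance As (fun a => decide (a < b)) st.1
    let j := pvAdvance Cs (fun c => decide (c ≤ b)) st.2.1
    (i, j, st.2.2 + (i : Int) * ((nC : Int) - (j : Int)))) (0, 0, 0)
  fin.2.2

-- ===== PRECONDITION & SPEC =====
def Spec_count_possible_altars (N : Int) (A : List Int) (B : List Int) (C : List Int) (out : Int) : Prop := out = count_possible_altars_alt N A B C
instance (N : Int) (A : List Int) (B : List Int) (C : List Int) (out : Int) : Decidable (Spec_count_possible_altars N A B C out) := by unfold Spec_count_possible_altars; infer_instance

-- ===== CLAIM (what is proved, stated in full; the proofs are below) =====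
def Claim_equal_count_possible_altars : Prop := ∀ (N : Int) (A : List Int) (B : List Int) (C : List Int), Dom_count_possible_altars N A B C → Spec_count_possible_altars N A B C (count_possible_altars N A B C)

-- ===== LEMMAS AND PROOFS =====

-- The pointer loop stops exactly at k when p holds strictly before k and fails from k on.
lemma pvAdvance_eq {xs : List Int} {p : Int → Bool} {k : Nat} (hk : k ≤ xs.length)
    (h1 : ∀ j (hj : j < xs.length), j < k → p xs[j] = true)
    (h2 : ∀ j (hj : j < xs.length), k ≤ j → p xs[j] = false) :
    ∀ i, i ≤ k → pvAdvance xs p i = k := by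
  have main : ∀ n i, k - i ≤ n → i ≤ k → pvAdvance xs p i = k := by
    intro n
    induction n with
    | zero =>
      intro i hn hi
      have hik : i = k := by omega
      subst hik
      rw [pvAdvance]
      by_cases h : i < xs.length
      · simp [h, h2 i h (le_refl i)]
      · simp [h]
    | succ n ih =>
      intro i hn hi
      by_cases hik : i = k
      · subst hik
        rw [pvAdvance]
        by_cases h : i < xs.length
        · simp [h, h2 i h (le_refl i)]
        · simp [h]
      · have hlt : i < k := by omega
        have hilen : i < xs.length := by omega
        rw [pvAdvance]
        simp only [hilen, dif_pos, h1 i hilen hlt, if_pos]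
        exact ih (i + 1) (by omega) (by omega)
  intro i hi
  exact main (k - i) i (le_refl _) hi

-- bisectLeft on a sorted list is the stopping point of the `< b` pointer loop.
lemma pvAdvance_lt_eq_bisectLeft {xs : List Int} (hs : List.Pairwise (· ≤ ·) xs) (b : Int)
    {i : Nat} (hi : i ≤ PySem.List.bisectLeft xs b) :
    pvAdvance xs (fun a => decide (a < b)) i = PySem.List.bisectLeft xs b := by
  obtain ⟨hk, h1, h2⟩ := PySem.List.bisectLeft_spec xs b hs
  exact pvAdvance_eq hk
    (fun j hj hjk => by simp [h1 j hj hjk])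
    (fun j hj hjk => by simp [not_lt.mpr (h2 j hj hjk)]) i hi

-- bisectRight on a sorted list is the stopping point of the `≤ b` pointer loop.
lemma pvAdvance_le_eq_bisectRight {xs : List Int} (hs : List.Pairwise (· ≤ ·) xs) (b : Int)
    {i : Nat} (hi : i ≤ PySem.List.bisectRight xs b) :
    pvAdvance xs (fun c => decide (c ≤ b)) i = PySem.List.bisectRight xs b := by
  obtain ⟨hk, h1, h2⟩ := PySem.List.bisectRight_spec xs b hs
  exact pvAdvance_eq hk
    (fun j hj hjk => by simp [h1 j hj hjk])
    (fun j hj hjk => by simp [not_le.mpr (h2 j hj hjk)]) i hi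

lemma bisectLeft_mono {xs : List Int} (hs : List.Pairwise (· ≤ ·) xs) {b b' : Int} (hb : b ≤ b') :
    PySem.List.bisectLeft xs b ≤ PySem.List.bisectLeft xs b' := by
  obtain ⟨hk, h1, _⟩ := PySem.List.bisectLeft_spec xs b hs
  obtain ⟨hk', _, h2'⟩ := PySem.List.bisectLeft_spec xs b' hs
  by_contra h
  push Not at h
  have hj : PySem.List.bisectLeft xs b' < xs.length := by omega
  have := h1 _ hj h
  have := h2' _ hj (le_refl _)
  omega

lemma bisectRight_mono {xs : List Int} (hs : List.Pairwise (· ≤ ·) xs) {b b' : Int} (hb : b ≤ b') :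
    PySem.List.bisectRight xs b ≤ PySem.List.bisectRight xs b' := by
  obtain ⟨hk, h1, _⟩ := PySem.List.bisectRight_spec xs b hs
  obtain ⟨hk', _, h2'⟩ := PySem.List.bisectRight_spec xs b' hs
  by_contra h
  push Not at h
  have hj : PySem.List.bisectRight xs b' < xs.length := by omega
  have := h1 _ hj h
  have := h2' _ hj (le_refl _)
  omega

-- The merge-sweep fold over a sorted B computes the same running sum as A's fold,
-- provided the incoming pointers are below the counts for every remaining b.
lemma sweep_fold_eq (As Cs : List Int) (hA : List.Pairwise (· ≤ ·) As)
    (hC : List.Pairwise (· ≤ ·) Cs) :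
    ∀ (Bs : List Int), List.Pairwise (· ≤ ·) Bs →
    ∀ (i j : Nat) (t : Int),
      (∀ b ∈ Bs, i ≤ PySem.List.bisectLeft As b ∧ j ≤ PySem.List.bisectRight Cs b) →
      (Bs.foldl (fun (st : Nat × Nat × Int) b =>
        let i' := pvAdvance As (fun a => decide (a < b)) st.1
        let j' := pvAdvance Cs (fun c => decide (c ≤ b)) st.2.1
        (i', j', st.2.2 + (i' : Int) * ((Cs.length : Int) - (j' : Int)))) (i, j, t)).2.2 =
      Bs.foldl (fun s b =>
        s + ((PySem.List.bisectLeft As b : Int)) * ((Cs.length : Int) - (PySem.List.bisectRight Cs b : Int))) t := by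
  intro Bs
  induction Bs with
  | nil => intro _ i j t _; rfl
  | cons b rest ih =>
    intro hp i j t hinv
    have hb := hinv b (List.mem_cons_self)
    have hadvA := pvAdvance_lt_eq_bisectLeft hA b hb.1
    have hadvC := pvAdvance_le_eq_bisectRight hC b hb.2
    simp only [List.foldl_cons, hadvA, hadvC]
    have hrest : ∀ b' ∈ rest, b ≤ b' := (List.pairwise_cons.mp hp).1
    exact ih (List.pairwise_cons.mp hp).2 _ _ _
      (fun b' hb' => ⟨bisectLeft_mono hA (hrest b' hb'),
                      bisectRight_mono hC (hrest b' hb')⟩)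

-- ===== VERDICT (by name: the statement is the Claim_ definition above) =====
theorem count_possible_altars_spec : Claim_equal_count_possible_altars := by
  intro N A B C _
  unfold Spec_count_possible_altars count_possible_altars count_possible_altars_alt
  have hA := PySem.List.sorted_pairwise A (fun x => x)
  have hB := PySem.List.sorted_pairwise B (fun x => x)
  have hC := PySem.List.sorted_pairwise C (fun x => x)
  exact (sweep_fold_eq _ _ hA hC _ hB 0 0 0 (fun b _ => ⟨Nat.zero_le _, Nat.zero_le _⟩)).symm
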